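-- pv_equiv track=rewrite | github.com/Juann-18/Proyecto_Algoritmo | CSC.py | matriz_a_csc
-- ===== SOURCE A (Python) =====
-- def matriz_a_csc(matriz):
--     filas = len(matriz)
--     columnas = len(matriz[0])
--     valores = []
--     filas_idx = []
--     ccolumnas = [0]
--     contador = 0
--     for j in range(columnas):
--         for i in range(filas):
--             if matriz[i][j] != 0:
--                 valores.append(matriz[i][j])
--                 filas_idx.append(i)
--                 contador += 1
--         ccolumnas.append(contador)
--     return valores, filas_idx, ccolumnas
-- ===== SOURCE B (Python) =====
-- def matriz_a_csc(matriz):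
--     columnas = len(matriz[0])
--     buckets = [[] for _ in range(columnas)]
--     for i, fila in enumerate(matriz):
--         buckets = [b + ([(fila[j], i)] if fila[j] != 0 else [])
--                    for j, b in enumerate(buckets)]
--     valores = []
--     filas_idx = []
--     ccolumnas = [0]
--     for b in buckets:
--         valores += [v for v, _ in b]
--         filas_idx += [i for _, i in b]
--         ccolumnas.append(ccolumnas[-1] + len(b))
--     return valores, filas_idx, ccolumnas
-- ===== Notes on version B (the rewrite author's own statement) =====
-- stated objective: alternative
-- what changed: Replaces A's column-major double index loop by a single row-major pass that fills per-column buckets of (value, row) pairs, followed by a concatenation/cumulative-count assembly phase.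
import Mathlib
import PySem

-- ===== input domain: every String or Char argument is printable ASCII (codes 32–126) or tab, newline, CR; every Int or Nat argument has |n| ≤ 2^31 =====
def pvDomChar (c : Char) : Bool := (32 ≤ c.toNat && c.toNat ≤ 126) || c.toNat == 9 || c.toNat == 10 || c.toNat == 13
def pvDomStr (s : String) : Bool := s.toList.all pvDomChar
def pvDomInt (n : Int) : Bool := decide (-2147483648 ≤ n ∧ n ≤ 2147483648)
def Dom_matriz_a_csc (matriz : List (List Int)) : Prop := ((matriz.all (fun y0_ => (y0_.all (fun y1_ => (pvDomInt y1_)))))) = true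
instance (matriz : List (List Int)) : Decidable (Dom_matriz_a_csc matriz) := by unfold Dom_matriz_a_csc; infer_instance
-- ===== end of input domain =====

-- B replaces A's column-major double index loop by a row-major pass filling per-column
-- buckets of (value,row) pairs, then an assembly phase (alternative decomposition, same cost).


-- ===== PORT A =====
def matriz_a_csc (matriz : List (List Int)) : List Int × List Int × List Int :=
  let filas : Int := matriz.length
  let columnas : Int := (PySem.List.pyGetD matriz 0 []).length
  let st :=
    (PySem.List.pyRange 0 columnas 1).foldl
      (fun (st : List Int × List Int × List Int × Int) j =>
        let s2 :=
          (PySem.List.pyRange 0 filas 1).foldl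
            (fun (s : List Int × List Int × Int) i =>
              if PySem.List.pyGetD (PySem.List.pyGetD matriz i []) j 0 ≠ 0 then
                (s.1 ++ [PySem.List.pyGetD (PySem.List.pyGetD matriz i []) j 0],
                 s.2.1 ++ [i], s.2.2 + 1)
              else s)
            (st.1, st.2.1, st.2.2.2)
        (s2.1, s2.2.1, st.2.2.1 ++ [s2.2.2], s2.2.2))
      ([], [], [0], 0)
  (st.1, st.2.1, st.2.2.1)

-- ===== PORT B =====
def matriz_a_csc_alt (matriz : List (List Int)) : List Int × List Int × List Int :=
  let columnas : Int := (PySem.List.pyGetD matriz 0 []).length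
  let buckets0 : List (List (Int × Int)) := (PySem.List.pyRange 0 columnas 1).map (fun _ => [])
  let buckets :=
    (PySem.List.enumerate matriz).foldl
      (fun (bks : List (List (Int × Int))) p =>
        (PySem.List.enumerate bks).map
          (fun q =>
            q.2 ++ (if PySem.List.pyGetD p.2 q.1 0 ≠ 0 then
                      [(PySem.List.pyGetD p.2 q.1 0, p.1)] else [])))
      buckets0
  let fin :=
    buckets.foldl
      (fun (s : List Int × List Int × List Int) b =>
        (s.1 ++ b.map (fun q => q.1), s.2.1 ++ b.map (fun q => q.2),
         s.2.2 ++ [PySem.List.pyGetD s.2.2 (-1) 0 + (b.length : Int)]))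
      ([], [], [0])
  fin

-- ===== PRECONDITION & SPEC =====
-- Pre_ excludes exactly the inputs where the Python raises IndexError: the empty matrix
-- (matriz[0]) and ragged matrices with some row shorter than row 0 (matriz[i][j]).
def Pre_matriz_a_csc (matriz : List (List Int)) : Prop :=
  matriz ≠ [] ∧ ∀ fila ∈ matriz, (matriz.headD []).length ≤ fila.length
instance (matriz : List (List Int)) : Decidable (Pre_matriz_a_csc matriz) := by
  unfold Pre_matriz_a_csc; infer_instance
def pvWitness_matriz_a_csc : List (List Int) := [[1, 0], [0, 2]]

def Spec_matriz_a_csc (matriz : List (List Int)) (out : List Int × List Int × List Int) : Prop := out = matriz_a_csc_alt matriz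
instance (matriz : List (List Int)) (out : List Int × List Int × List Int) : Decidable (Spec_matriz_a_csc matriz out) := by unfold Spec_matriz_a_csc; infer_instance

-- ===== CLAIM (what is proved, stated in full; the proofs are below) =====
def Claim_equal_matriz_a_csc : Prop := ∀ (matriz : List (List Int)), Dom_matriz_a_csc matriz → Pre_matriz_a_csc matriz → Spec_matriz_a_csc matriz (matriz_a_csc matriz)

-- ===== LEMMAS AND PROOFS =====

-- contribution of one enumerated row p to column j
def cpContrib (p : Int × List Int) (j : Int) : List (Int × Int) :=
  if PySem.List.pyGetD p.2 j 0 ≠ 0 then [(PySem.List.pyGetD p.2 j 0, p.1)] else []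

-- the (value, row-index) pairs of column j, in row order
def cp (l : List (Int × List Int)) (j : Int) : List (Int × Int) :=
  l.flatMap (fun p => cpContrib p j)

-- running cumulative counts starting from c0
def cums (c0 : Int) : List (List (Int × Int)) → List Int
  | [] => []
  | b :: bs => (c0 + b.length) :: cums (c0 + b.length) bs

lemma cp_cons (p : Int × List Int) (l : List (Int × List Int)) (j : Int) :
    cp (p :: l) j = cpContrib p j ++ cp l j := by
  simp [cp]

lemma enum_map_range {α : Type} (f : Int → α) :
    ∀ (n : Nat) (a b : Int), (b - a).toNat = n →
      PySem.List.enumerate ((PySem.List.pyRange a b 1).map f) a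
        = (PySem.List.pyRange a b 1).map (fun j => (j, f j)) := by
  intro n
  induction n with
  | zero =>
    intro a b h
    rw [PySem.List.pyRange_one_eq_nil (by omega)]
    simp
  | succ n ih =>
    intro a b h
    rw [PySem.List.pyRange_one_cons (by omega)]
    simp only [List.map_cons, PySem.List.enumerate_cons]
    rw [ih (a + 1) b (by omega)]

lemma bucket_fold (b : Int) :
    ∀ (l : List (Int × List Int)) (f : Int → List (Int × Int)),
      l.foldl
        (fun (bks : List (List (Int × Int))) p =>
          (PySem.List.enumerate bks).map
            (fun q =>
              q.2 ++ (if PySem.List.pyGetD p.2 q.1 0 ≠ 0 then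
                        [(PySem.List.pyGetD p.2 q.1 0, p.1)] else [])))
        ((PySem.List.pyRange 0 b 1).map f)
      = (PySem.List.pyRange 0 b 1).map (fun j => f j ++ cp l j) := by
  intro l
  induction l with
  | nil => intro f; simp [cp]
  | cons p l ih =>
    intro f
    simp only [List.foldl_cons]
    rw [enum_map_range _ (b - 0).toNat 0 b rfl, List.map_map]
    rw [show ((fun q : Int × List (Int × Int) =>
          q.2 ++ (if PySem.List.pyGetD p.2 q.1 0 ≠ 0 then
                    [(PySem.List.pyGetD p.2 q.1 0, p.1)] else [])) ∘ (fun j => (j, f j)))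
        = (fun j => f j ++ cpContrib p j) from rfl]
    rw [ih (fun j => f j ++ cpContrib p j)]
    simp [cp_cons, List.append_assoc]

lemma asm_fold :
    ∀ (bs : List (List (Int × Int))) (V F W : List Int) (c0 : Int),
      bs.foldl
        (fun (s : List Int × List Int × List Int) b =>
          (s.1 ++ b.map (fun q => q.1), s.2.1 ++ b.map (fun q => q.2),
           s.2.2 ++ [PySem.List.pyGetD s.2.2 (-1) 0 + (b.length : Int)]))
        (V, F, W ++ [c0])
      = (V ++ bs.flatMap (fun b => b.map (fun q => q.1)),
         F ++ bs.flatMap (fun b => b.map (fun q => q.2)),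
         (W ++ [c0]) ++ cums c0 bs) := by
  intro bs
  induction bs with
  | nil => intro V F W c0; simp [cums]
  | cons b bs ih =>
    intro V F W c0
    simp only [List.foldl_cons, PySem.List.pyGetD_neg_one_append_singleton]
    rw [ih]
    simp [cums, List.append_assoc]

lemma inner_fold (j : Int) :
    ∀ (l : List (Int × List Int)) (V F : List Int) (c : Int),
      l.foldl
        (fun (s : List Int × List Int × Int) p =>
          if PySem.List.pyGetD p.2 j 0 ≠ 0 then
            (s.1 ++ [PySem.List.pyGetD p.2 j 0], s.2.1 ++ [p.1], s.2.2 + 1)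
          else s)
        (V, F, c)
      = (V ++ (cp l j).map (fun q => q.1), F ++ (cp l j).map (fun q => q.2),
         c + ((cp l j).length : Int)) := by
  intro l
  induction l with
  | nil => intro V F c; simp [cp]
  | cons p l ih =>
    intro V F c
    by_cases h : PySem.List.pyGetD p.2 j 0 ≠ 0
    · simp only [List.foldl_cons, if_pos h]
      rw [ih]
      simp [cp_cons, cpContrib, h]
      omega
    · simp only [List.foldl_cons, if_neg h]
      rw [ih]
      simp [cp_cons, cpContrib, h]

lemma inner_fold' (matriz : List (List Int)) (j : Int) (V F : List Int) (c : Int) :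
    (PySem.List.pyRange 0 (matriz.length : Int) 1).foldl
      (fun (s : List Int × List Int × Int) i =>
        if PySem.List.pyGetD (PySem.List.pyGetD matriz i []) j 0 ≠ 0 then
          (s.1 ++ [PySem.List.pyGetD (PySem.List.pyGetD matriz i []) j 0],
           s.2.1 ++ [i], s.2.2 + 1)
        else s)
      (V, F, c)
    = (V ++ (cp (PySem.List.enumerate matriz) j).map (fun q => q.1),
       F ++ (cp (PySem.List.enumerate matriz) j).map (fun q => q.2),
       c + ((cp (PySem.List.enumerate matriz) j).length : Int)) := by
  have h := inner_fold j (PySem.List.enumerate matriz) V F c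
  nth_rewrite 1 [PySem.List.enumerate_eq_map_pyRange (d := ([] : List Int))] at h
  rw [List.foldl_map] at h
  exact h

lemma outer_fold (matriz : List (List Int)) :
    ∀ (js : List Int) (V F CC : List Int) (c : Int),
      js.foldl
        (fun (st : List Int × List Int × List Int × Int) j =>
          let s2 :=
            (PySem.List.pyRange 0 (matriz.length : Int) 1).foldl
              (fun (s : List Int × List Int × Int) i =>
                if PySem.List.pyGetD (PySem.List.pyGetD matriz i []) j 0 ≠ 0 then
                  (s.1 ++ [PySem.List.pyGetD (PySem.List.pyGetD matriz i []) j 0],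
                   s.2.1 ++ [i], s.2.2 + 1)
                else s)
              (st.1, st.2.1, st.2.2.2)
          (s2.1, s2.2.1, st.2.2.1 ++ [s2.2.2], s2.2.2))
        (V, F, CC, c)
      = (V ++ js.flatMap (fun j => (cp (PySem.List.enumerate matriz) j).map (fun q => q.1)),
         F ++ js.flatMap (fun j => (cp (PySem.List.enumerate matriz) j).map (fun q => q.2)),
         CC ++ cums c (js.map (fun j => cp (PySem.List.enumerate matriz) j)),
         c + ((js.map (fun j => ((cp (PySem.List.enumerate matriz) j).length : Int))).sum)) := by
  intro js
  induction js with
  | nil => intro V F CC c; simp [cums]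
  | cons j js ih =>
    intro V F CC c
    simp only [List.foldl_cons]
    rw [inner_fold']
    rw [ih]
    simp [cums, List.append_assoc]
    omega

-- ===== VERDICT (by name: the statement is the Claim_ definition above) =====
theorem matriz_a_csc_spec : Claim_equal_matriz_a_csc := by
  intro matriz _ _
  unfold Spec_matriz_a_csc
  simp only [matriz_a_csc, matriz_a_csc_alt]
  rw [outer_fold, bucket_fold _ _ (fun _ => ([] : List (Int × Int)))]
  rw [show (([], [], [0]) : List Int × List Int × List Int)
        = (([], [], ([] : List Int) ++ [0]) : List Int × List Int × List Int) from rfl]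
  rw [asm_fold]
  simp [List.flatMap_map]
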